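-- pv_equiv track=rewrite | github.com/ddraa/Algorithm | String/불량 사용자/solution2.py | solution
-- ===== SOURCE A (Python) =====
-- import itertools, copy
--
-- def solution(user_id, banned_id):
--     users_id = itertools.combinations(user_id, len(banned_id))
--     temp = copy.deepcopy(banned_id)
--     count = 0
--     answer = []
--     for users in users_id:
--         use_per = itertools.permutations(users) # all permutation of users
--         for users_list in use_per:
--             for user in users_list:
--                 for ban in banned_id:
--                     removed = False
--                     if len(user) == len(ban):
--                         Flag = True
--                         for i in range(len(ban)):
--                             if ban[i] != '*' and user[i] != ban[i]:
--                                 Flag = False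
--                         if Flag: # can mapping
--                             removed = True
--                             banned_id.remove(ban)
--                     if removed:
--                         break
--             if not banned_id and users not in answer:
--                 answer.append(users)
--                 count += 1
--                 banned_id = copy.deepcopy(temp)
--                 break
--             banned_id = copy.deepcopy(temp)
--     return count
-- ===== SOURCE B (Python) =====
-- from itertools import combinations
--
--
-- def solution(user_id, banned_id):
--     def can_match(users, bans):
--         # assign each banned pattern (in order) to a distinct remaining user, backtracking
--         if not bans:
--             return True
--         b, rest = bans[0], bans[1:]
--         for idx, u in enumerate(users):
--             if len(u) == len(b) and all(p == '*' or p == c for c, p in zip(u, b)):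
--                 if can_match(users[:idx] + users[idx + 1:], rest):
--                     return True
--         return False
--
--     return len({c for c in combinations(user_id, len(banned_id)) if can_match(c, banned_id)})
-- ===== Notes on version B (the rewrite author's own statement) =====
-- stated objective: faster
-- what changed: A tries all k! permutations of each candidate combination, each checked by a destructive greedy pass over the ban list, and dedups via a linear scan of an answer list; B decides each combination with a pruned backtracking assignment of bans to users and counts via a set comprehension.
import Mathlib
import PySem

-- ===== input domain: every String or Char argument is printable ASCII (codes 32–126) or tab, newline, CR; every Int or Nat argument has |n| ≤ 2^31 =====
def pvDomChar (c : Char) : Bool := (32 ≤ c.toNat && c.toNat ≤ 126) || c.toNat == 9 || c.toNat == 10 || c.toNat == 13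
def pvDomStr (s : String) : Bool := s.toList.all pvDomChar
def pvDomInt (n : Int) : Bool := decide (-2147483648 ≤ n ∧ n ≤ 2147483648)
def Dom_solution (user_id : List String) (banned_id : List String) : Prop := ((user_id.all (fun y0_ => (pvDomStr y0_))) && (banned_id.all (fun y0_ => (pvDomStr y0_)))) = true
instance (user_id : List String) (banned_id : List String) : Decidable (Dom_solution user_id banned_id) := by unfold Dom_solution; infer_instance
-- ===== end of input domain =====

-- B replaces A's scan of all k! permutations (each checked by greedy destructive matching) with a
-- pruned backtracking match per combination and a set comprehension for the dedup count; equivalence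
-- is about the return value only (Python A also mutates its banned_id argument via list.remove).

-- ===== PORT A =====
-- char access s[i]; every use below has i < length (guarded by the length-equality test), so getD is exact
def pvCharAt (s : String) (i : Nat) : Char := s.toList.getD i ' '

-- 'if len(user) == len(ban): Flag = True; for i in range(len(ban)): …; if Flag: …' (the per-ban test of A)
def pvMatchA (user ban : String) : Bool :=
  if PySem.Str.len user == PySem.Str.len ban then
    (List.range ban.toList.length).foldl
      (fun flag i => if pvCharAt ban i != '*' && pvCharAt user i != pvCharAt ban i then false else flag)
      true
  else false

-- 'for ban in banned_id: … if removed: break' — first ban the user can map to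
def pvFindBan (u : String) : List String → Option String
  | [] => none
  | b :: rest => if pvMatchA u b then some b else pvFindBan u rest

-- one user's pass: remove the first matching ban ('banned_id.remove(ban)'); b ∈ bans whenever found, so getD is exact
def pvStep (bans : List String) (u : String) : List String :=
  match pvFindBan u bans with
  | some b => (PySem.List.remove? bans b).getD bans
  | none => bans

-- 'for user in users_list: …' with banned_id threaded through
def pvGreedy (p : List String) (bans : List String) : List String := p.foldl pvStep bans

-- 'for users_list in use_per: … break' — the permutation loop with its early exit
def pvPermLoop (c : List String) (bans : List String) :
    List (List String) → Int → List (List String) → Int × List (List String)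
  | [], count, answer => (count, answer)
  | p :: rest, count, answer =>
    if pvGreedy p bans == ([] : List String) && !(answer.contains c) then
      (count + 1, answer ++ [c])
    else pvPermLoop c bans rest count answer

def solution (user_id : List String) (banned_id : List String) : Int :=
  ((PySem.List.combinations user_id banned_id.length).foldl
    (fun st c => pvPermLoop c banned_id (PySem.List.permutations c c.length) st.1 st.2)
    (0, [])).1

-- ===== PORT B =====
-- 'len(u) == len(b) and all(p == '*' or p == c for c, p in zip(u, b))'
def pvMatchB (u b : String) : Bool :=
  PySem.Str.len u == PySem.Str.len b &&
    (u.toList.zip b.toList).all (fun cp => cp.2 == '*' || cp.2 == cp.1)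

-- backtracking: assign bans[0] to some user, recurse on the rest ('users[:idx] + users[idx+1:]' = eraseIdx);
-- idx < users.length at every use, so getD is exact
def pvCanMatch : List String → List String → Bool
  | _, [] => true
  | users, b :: rest =>
    (List.range users.length).any (fun idx =>
      pvMatchB (users.getD idx "") b && pvCanMatch (users.eraseIdx idx) rest)

-- 'len({c for c in combinations(user_id, len(banned_id)) if can_match(c, banned_id)})'
def solution_alt (user_id : List String) (banned_id : List String) : Int :=
  ((PySem.Set.ofList ((PySem.List.combinations user_id banned_id.length).filter
      (fun c => pvCanMatch c banned_id))).length : Int)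

-- ===== PRECONDITION & SPEC =====
def Spec_solution (user_id : List String) (banned_id : List String) (out : Int) : Prop := out = solution_alt user_id banned_id
instance (user_id : List String) (banned_id : List String) (out : Int) : Decidable (Spec_solution user_id banned_id out) := by unfold Spec_solution; infer_instance

-- ===== CLAIM (what is proved, stated in full; the proofs are below) =====
def Claim_equal_solution : Prop := ∀ (user_id : List String) (banned_id : List String), Dom_solution user_id banned_id → Spec_solution user_id banned_id (solution user_id banned_id)

-- ===== LEMMAS AND PROOFS =====

-- the matching relation both programs decide
def pvM (u b : String) : Prop := pvMatchB u b = true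

theorem pvFindBan_sound (u : String) (bans : List String) (b : String)
    (h : pvFindBan u bans = some b) : pvMatchA u b = true ∧ b ∈ bans := by
  induction bans with
  | nil => simp [pvFindBan] at h
  | cons x rest ih =>
    by_cases hm : pvMatchA u x = true
    · simp [pvFindBan, hm] at h
      exact ⟨h ▸ hm, by simp [h]⟩
    · simp [pvFindBan, hm] at h
      rcases ih h with ⟨h1, h2⟩
      exact ⟨h1, by simp [h2]⟩

-- A's index loop over range(len(ban)) tests the same positions as B's zip
theorem pvChars_aux (us bs : List Char) (hlen : us.length = bs.length) :
    (!(List.range bs.length).any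
        (fun i => (bs.getD i ' ' != '*') && (us.getD i ' ' != bs.getD i ' ')))
      = (us.zip bs).all (fun cp => cp.2 == '*' || cp.2 == cp.1) := by
  induction bs generalizing us with
  | nil => simp at hlen; simp [hlen]
  | cons b bt ih =>
    cases us with
    | nil => simp at hlen
    | cons u ut =>
      simp only [List.length_cons, List.range_succ_eq_map, List.any_cons, List.any_map,
        List.zip_cons_cons, List.all_cons]
      have := ih ut (by simpa using hlen)
      simp only [List.getD_cons_zero] at this ⊢
      rw [Bool.not_or, ← this]
      congr 1
      simp only [bne, Bool.not_and, Bool.not_not]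
      rw [Bool.beq_comm (a := u) (b := b)]

theorem pvMatchA_eq_matchB (u b : String) : pvMatchA u b = pvMatchB u b := by
  unfold pvMatchA pvMatchB
  by_cases hlen : PySem.Str.len u == PySem.Str.len b
  · have hl : u.toList.length = b.toList.length := by
      simp [PySem.Str.len_eq] at hlen; exact_mod_cast hlen
    rw [if_pos hlen, hlen, Bool.true_and]
    rw [PySem.List.foldl_if_false_eq
      (p := fun i => (pvCharAt b i != '*') && (pvCharAt u i != pvCharAt b i))]
    simpa [pvCharAt] using pvChars_aux u.toList b.toList hl
  · simp at hlen
    simp [hlen]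

-- a permutation that matches the bans position by position empties them greedily
theorem pvGreedy_of_forall₂ (q bans : List String)
    (h : List.Forall₂ pvM q bans) : pvGreedy q bans = [] := by
  induction h with
  | nil => rfl
  | @cons u b q' bans' hm _ ih =>
    have hA : pvMatchA u b = true := by rw [pvMatchA_eq_matchB]; exact hm
    show pvGreedy q' (pvStep (b :: bans') u) = []
    simp [pvStep, pvFindBan, hA, PySem.List.remove?_cons_self]
    exact ih

theorem pvForall₂_append (t l1 d l2 : List String)
    (h1 : List.Forall₂ pvM t l1) (h2 : List.Forall₂ pvM d l2) :
    List.Forall₂ pvM (t ++ d) (l1 ++ l2) := by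
  induction h1 with
  | nil => exact h2
  | cons hx _ ih => exact List.forall₂_cons.mpr ⟨hx, ih⟩

-- re-insert the matched user at the removed ban's position
theorem pvForall₂_insert (r l1 l2 : List String) (u b : String)
    (h : List.Forall₂ pvM r (l1 ++ l2)) (hm : pvM u b) :
    ∃ r', r'.Perm (u :: r) ∧ List.Forall₂ pvM r' (l1 ++ b :: l2) := by
  refine ⟨r.take l1.length ++ u :: r.drop l1.length, ?_, ?_⟩
  · have hp : (r.take l1.length ++ u :: r.drop l1.length).Perm
        (u :: (r.take l1.length ++ r.drop l1.length)) := List.perm_middle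
    rwa [List.take_append_drop] at hp
  · exact pvForall₂_append _ _ _ _ (List.forall₂_take_append r l1 l2 h)
      (List.forall₂_cons.mpr ⟨hm, List.forall₂_drop_append r l1 l2 h⟩)

-- a successful greedy run yields a matched sub-permutation of the users
theorem pvGreedy_subperm (q : List String) : ∀ bans : List String,
    pvGreedy q bans = [] → ∃ r, r.Subperm q ∧ List.Forall₂ pvM r bans := by
  induction q with
  | nil => intro bans h; exact ⟨[], List.nil_subperm, by simp [pvGreedy] at h; simp [h]⟩
  | cons u q' ih =>
    intro bans h
    have hstep : pvGreedy q' (pvStep bans u) = [] := h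
    cases hfb : pvFindBan u bans with
    | none =>
      simp only [pvStep, hfb] at hstep
      rcases ih bans hstep with ⟨r, hsub, hf⟩
      exact ⟨r, hsub.cons_right u, hf⟩
    | some b =>
      rcases pvFindBan_sound u bans b hfb with ⟨hA, hbmem⟩
      have hm : pvM u b := by rw [pvM, ← pvMatchA_eq_matchB]; exact hA
      simp only [pvStep, hfb, PySem.List.remove?_eq_some_erase bans b hbmem,
        Option.getD_some] at hstep
      rcases ih _ hstep with ⟨r, hsub, hf⟩
      rcases List.exists_erase_eq hbmem with ⟨l1, l2, _, hbans, herase⟩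
      rw [herase] at hf
      rcases pvForall₂_insert r l1 l2 u b hf hm with ⟨r', hperm, hf'⟩
      refine ⟨r', ?_, by rw [hbans]; exact hf'⟩
      have h1 : (u :: r).Subperm (u :: q') := (List.subperm_cons u).mpr hsub
      exact (List.Perm.subperm_right (id (List.Perm.symm hperm))).mp h1

theorem pvMem_permutations_of_perm (q : List String) : ∀ xs : List String, q.Perm xs →
    q ∈ PySem.List.permutations xs xs.length := by
  induction q with
  | nil =>
    intro xs h
    have : xs = [] := h.symm.eq_nil
    subst this; simp [PySem.List.permutations_zero]
  | cons x q' ih =>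
    intro xs h
    have hx : x ∈ xs := h.mem_iff.mp (by simp)
    have hlen : xs.length = q'.length + 1 := by
      have := h.length_eq; simpa using this.symm
    rw [hlen, PySem.List.permutations_succ]
    rw [List.mem_flatMap]
    refine ⟨xs.idxOf x, by simp [List.mem_range, List.idxOf_lt_length_iff, hx], ?_⟩
    have hget : xs[xs.idxOf x]? = some x := List.getElem?_idxOf hx
    rw [hget]
    simp only [List.mem_map]
    refine ⟨q', ?_, rfl⟩
    have hperm : (x :: xs.eraseIdx (xs.idxOf x)).Perm xs := PySem.List.perm_cons_eraseIdx xs hget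
    have hq' : q'.Perm (xs.eraseIdx (xs.idxOf x)) := (h.trans hperm.symm).cons_inv
    have hlen2 : (xs.eraseIdx (xs.idxOf x)).length = q'.length := hq'.length_eq.symm
    rw [← hlen2]
    exact ih _ hq'

-- A's per-combination test: some permutation empties the bans ⟺ a matched rearrangement exists
theorem pvAnyGreedy_iff (c bans : List String) (hlen : c.length = bans.length) :
    ((PySem.List.permutations c c.length).any
        (fun p => pvGreedy p bans == ([] : List String))) = true
      ↔ ∃ q, q.Perm c ∧ List.Forall₂ pvM q bans := by
  constructor
  · intro h
    rcases List.any_eq_true.mp h with ⟨p, hp, hg⟩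
    have hpc : p.Perm c := PySem.List.perm_of_mem_permutations hp
    have hg' : pvGreedy p bans = [] := by simpa using hg
    rcases pvGreedy_subperm p bans hg' with ⟨r, hsub, hf⟩
    have hr : r.Perm p := hsub.perm_of_length_le
      (by rw [hpc.length_eq, hlen, ← hf.length_eq])
    exact ⟨r, hr.trans hpc, hf⟩
  · rintro ⟨q, hq, hf⟩
    refine List.any_eq_true.mpr ⟨q, pvMem_permutations_of_perm q c hq, by
      simpa using pvGreedy_of_forall₂ q bans hf⟩

theorem pvCanMatch_iff (bans : List String) : ∀ users : List String,
    pvCanMatch users bans = true ↔ ∃ r, r.Subperm users ∧ List.Forall₂ pvM r bans := by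
  induction bans with
  | nil =>
    intro users
    simp only [pvCanMatch, true_iff]
    exact ⟨[], List.nil_subperm, List.Forall₂.nil⟩
  | cons b rest ih =>
    intro users
    constructor
    · intro h
      simp only [pvCanMatch, List.any_eq_true, List.mem_range] at h
      rcases h with ⟨idx, hidx, hcond⟩
      rcases Bool.and_eq_true_iff.mp hcond with ⟨hm, hrec⟩
      rcases (ih _).mp hrec with ⟨r', hsub, hf⟩
      have hget : users.getD idx "" = users[idx] := List.getD_eq_getElem users "" hidx
      have hget? : users[idx]? = some users[idx] := List.getElem?_eq_getElem hidx
      refine ⟨users[idx] :: r', ?_, List.forall₂_cons.mpr ⟨by rw [pvM, ← hget]; exact hm, hf⟩⟩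
      have h1 : (users[idx] :: r').Subperm (users[idx] :: users.eraseIdx idx) :=
        (List.subperm_cons _).mpr hsub
      exact h1.trans (PySem.List.perm_cons_eraseIdx users hget?).subperm
    · rintro ⟨r, hsub, hf⟩
      cases hf with
      | cons hm hf' =>
        rename_i u r'
        have hu : u ∈ users := hsub.subset (by simp)
        have hidx : users.idxOf u < users.length := List.idxOf_lt_length_iff.mpr hu
        have hget : users.getD (users.idxOf u) "" = u := by
          rw [List.getD_eq_getElem users "" hidx, List.getElem_idxOf hidx]
        have hperm : users.Perm (u :: users.erase u) := List.perm_cons_erase hu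
        have hsub' : r'.Subperm (users.erase u) := by
          have h1 : (u :: r').Subperm (u :: users.erase u) := hsub.trans hperm.subperm
          exact (List.subperm_cons u).mp h1
        have hrec : pvCanMatch (users.eraseIdx (users.idxOf u)) rest = true := by
          rw [← List.erase_eq_eraseIdx_of_idxOf rfl]
          exact (ih _).mpr ⟨r', hsub', hf'⟩
        simp only [pvCanMatch, List.any_eq_true, List.mem_range]
        exact ⟨users.idxOf u, hidx, Bool.and_eq_true_iff.mpr ⟨by rw [hget]; exact hm, hrec⟩⟩

-- on combinations (|c| = |bans|) the two per-candidate tests agree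
theorem pvPred_eq (c bans : List String) (hlen : c.length = bans.length) :
    ((PySem.List.permutations c c.length).any
        (fun p => pvGreedy p bans == ([] : List String)))
      = pvCanMatch c bans := by
  rw [Bool.eq_iff_iff, pvAnyGreedy_iff c bans hlen, pvCanMatch_iff]
  constructor
  · rintro ⟨q, hq, hf⟩; exact ⟨q, hq.subperm, hf⟩
  · rintro ⟨r, hsub, hf⟩
    refine ⟨r, hsub.perm_of_length_le ?_, hf⟩
    rw [hlen, ← hf.length_eq]

theorem pvPermLoop_spec (c bans : List String) (perms : List (List String))
    (count : Int) (answer : List (List String)) :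
    pvPermLoop c bans perms count answer =
      if (perms.any (fun p => pvGreedy p bans == ([] : List String))) && !(answer.contains c) then
        (count + 1, answer ++ [c])
      else (count, answer) := by
  induction perms with
  | nil => simp [pvPermLoop]
  | cons p rest ih =>
    show (if (pvGreedy p bans == ([] : List String)) && !(answer.contains c) then
        (count + 1, answer ++ [c])
      else pvPermLoop c bans rest count answer) = _
    by_cases hc : answer.contains c
    · have hcm : c ∈ answer := by simpa using hc
      rw [ih]; simp [hcm]
    · have hcm : c ∉ answer := by simpa using hc
      rw [ih]
      by_cases hg : pvGreedy p bans = []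
      · simp [hg, hcm]
      · simp [hg, hcm]

theorem pvFold_eq (bans : List String) (L : List (List String))
    (hL : ∀ c ∈ L, ((PySem.List.permutations c c.length).any
        (fun p => pvGreedy p bans == ([] : List String))) = pvCanMatch c bans) :
    ∀ (s : List (List String)) (count : Int), count = (s.length : Int) →
    (L.foldl (fun st c => pvPermLoop c bans (PySem.List.permutations c c.length) st.1 st.2)
        (count, s)).1
      = ((L.foldl (fun s c => if pvCanMatch c bans then PySem.Set.add s c else s) s).length : Int) := by
  induction L with
  | nil => intro s count h; simpa using h
  | cons c rest ih =>
    intro s count h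
    have hc := hL c (by simp)
    have hrest : ∀ c' ∈ rest, ((PySem.List.permutations c' c'.length).any
        (fun p => pvGreedy p bans == ([] : List String))) = pvCanMatch c' bans :=
      fun c' hm => hL c' (by simp [hm])
    simp only [List.foldl_cons]
    rw [pvPermLoop_spec, hc]
    by_cases hP : pvCanMatch c bans = true
    · by_cases hmem : s.contains c = true
      · rw [hP, hmem]
        simp only [Bool.not_true, Bool.and_false, Bool.false_eq_true, if_false,
          PySem.Set.add_of_mem (by simpa using hmem)]
        exact ih hrest s count h
      · have hmem' : s.contains c = false := by simpa using hmem
        rw [hP, hmem']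
        simp only [Bool.not_false, Bool.and_true,
          PySem.Set.add_of_not_mem (by simpa using hmem)]
        exact ih hrest (s ++ [c]) (count + 1) (by simp [h])
    · have hP' : pvCanMatch c bans = false := by simpa using hP
      rw [hP']
      simp only [Bool.false_and, Bool.false_eq_true, if_false]
      exact ih hrest s count h

-- ===== VERDICT (by name: the statement is the Claim_ definition above) =====
theorem solution_spec : Claim_equal_solution := by
  intro user_id banned_id _
  unfold Spec_solution solution solution_alt
  rw [PySem.Set.ofList_eq_foldl, ← PySem.List.foldl_if_eq_foldl_filter
    (p := fun c => pvCanMatch c banned_id) (f := PySem.Set.add)]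
  exact pvFold_eq banned_id _ (fun c hm => pvPred_eq c banned_id
    (PySem.List.length_of_mem_combinations hm)) [] 0 rfl
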